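-- pv_equiv track=rewrite | github.com/JordanTYC/stageINRIA | work2.py | nb_isolated
-- ===== SOURCE A (Python) =====
-- N_GAP = 100
--
-- def get_beg_bx(s):
--     '''
--         Returns the position of a linked-read.
--
--         s -- string (chrom:pos:length)
--     '''
--     s = s.split(':')
--     return int(s[1])
--
-- def get_len_bx(s):
--     '''
--         Returns the length of a linked-read.
--
--         s -- string (chrom:pos:length)
--     '''
--     s = s.split(':')
--     return int(s[2])
--
-- def get_chrom_bx(s):
--     '''
--         Returns the chromosome of a linked-read.
--
--         s -- string (chrom:pos:length)
--     '''
--     s = s.split(':')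
--     return s[0]
--
-- def isIsolated(pos,P,gap=N_GAP):
--     '''
--         Returns True if a barcode is isolated, else False.
--
--         pos -- barcode's position
--         P -- list resulting from partition() + clean_P()
--     '''
--     for [a,b] in P:
--         if a - gap <= pos <= b + gap:
--             return False
--     return True
--
-- def partition(D,bx,c,gap=N_GAP):
--     '''
--         Returns the clusters for a barcode bx and their number of barcodes (list).
--
--         D -- dict containing all barcodes
--         bx -- barcode (string)
--         c -- chromosome (string)
--     '''
--     s = D[bx].split(",")
--     i = 0
--     chrom = get_chrom_bx(s[0])
--     while chrom != c:
--         i += 1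
--         chrom = get_chrom_bx(s[i])
--     beg = get_beg_bx(s[i])
--     n = get_len_bx(s[i])
--     P = [[beg,beg+n,1]]
--     for j in range(i+1,len(s)):
--         chrom = get_chrom_bx(s[j])
--         if chrom == c:
--           beg = get_beg_bx(s[j])
--           if beg - P[-1][1] <= gap:
--               P[-1][1] = beg + get_len_bx(s[j])
--               P[-1][2] += 1
--           else:
--               P.append([beg,beg + get_len_bx(s[j]),1])
--     return P
--
-- def clean_P(P,n=2):
--     '''
--         Removes all the clusters that do not have at least n barcodes.
--
--         P -- list from partition()
--     '''
--     F = []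
--     for [a,b,c] in P:
--         if c >= n:
--             F.append([a,b])
--     return F
--
-- def nb_isolated(L,bci,D,c):
--     '''
--         Returns the number of isolated barcodes.
--
--         L -- set of barcodes
--         D -- dict resulting from store_bx()
--     '''
--     cpt = 0
--     for (bx,pos) in L:
--         P = partition(D,bx,c)
--         P = clean_P(P)
--         if isIsolated(pos,P):
--             cpt += 1
--     return cpt
-- ===== SOURCE B (Python) =====
-- N_GAP = 100
--
--
-- def nb_isolated(L, bci, D, c):
--     '''
--         Returns the number of isolated barcodes.
--
--         Streaming rewrite: each distinct barcode of L is clustered at most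
--         once (results are cached), and the clustering itself is a single
--         pass that keeps only the current open cluster and emits a cleaned
--         cluster as soon as it is closed, instead of building the full
--         partition list and cleaning it afterwards.
--     '''
--     cache = {}
--     cpt = 0
--     for bx, pos in L:
--         if bx not in cache:
--             cache[bx] = bx_clusters(D[bx], c)
--         if is_isolated_in(pos, cache[bx]):
--             cpt += 1
--     return cpt
--
--
-- def bx_reads(v, c):
--     '''(position, length) of each chromosome-c linked-read of the entry v.'''
--     reads = []
--     for e in v.split(','):
--         f = e.split(':')
--         if f[0] == c:
--             reads.append((int(f[1]), int(f[2])))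
--     return reads
--
--
-- def bx_clusters(v, c, gap=N_GAP, n=2):
--     '''Gap-merged clusters of at least n chromosome-c reads, one pass.'''
--     done = []
--     cur = None
--     for beg, ln in bx_reads(v, c):
--         if cur is not None and beg - cur[1] <= gap:
--             cur = (cur[0], beg + ln, cur[2] + 1)
--         else:
--             if cur is not None and cur[2] >= n:
--                 done.append((cur[0], cur[1]))
--             cur = (beg, beg + ln, 1)
--     if cur is not None and cur[2] >= n:
--         done.append((cur[0], cur[1]))
--     return done
--
--
-- def is_isolated_in(pos, clusters, gap=N_GAP):
--     return all(not (a - gap <= pos <= b + gap) for a, b in clusters)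
-- ===== Notes on version B (the rewrite author's own statement) =====
-- stated objective: alternative
-- what changed: B caches the clustering result per distinct barcode and replaces A's three-stage pipeline (find first matching read with a while loop, build the full partition list updating its last element, then a separate clean_P pass) by a staged parse-then-stream pass: it first extracts the (pos,len) pairs of chromosome-c reads, then merges them keeping only the one open cluster and emitting each cleaned cluster as it closes.
import Mathlib
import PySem

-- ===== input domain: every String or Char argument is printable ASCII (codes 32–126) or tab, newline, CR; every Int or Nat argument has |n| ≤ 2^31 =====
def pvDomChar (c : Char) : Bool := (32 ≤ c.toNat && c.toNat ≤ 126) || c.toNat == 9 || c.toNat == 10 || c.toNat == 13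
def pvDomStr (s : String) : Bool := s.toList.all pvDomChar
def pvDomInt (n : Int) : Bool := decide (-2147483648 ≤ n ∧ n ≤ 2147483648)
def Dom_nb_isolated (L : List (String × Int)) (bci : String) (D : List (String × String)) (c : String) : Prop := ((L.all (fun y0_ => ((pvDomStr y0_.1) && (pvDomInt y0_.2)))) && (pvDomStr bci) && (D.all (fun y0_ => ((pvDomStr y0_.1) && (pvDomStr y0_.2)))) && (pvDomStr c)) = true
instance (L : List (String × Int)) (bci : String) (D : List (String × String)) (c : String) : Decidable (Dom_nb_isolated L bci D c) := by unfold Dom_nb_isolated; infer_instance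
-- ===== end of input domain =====

-- B caches the clustering once per distinct barcode and replaces A's three-stage pipeline
-- (while-scan, full partition list, separate clean pass) by a parse-then-stream pass that
-- keeps only the open cluster and emits cleaned clusters as they close.

-- ===== PORT A =====
-- s.split(sep) for a nonempty separator (exact: split? is none only for sep = "")
def pySplit (s sep : String) : List String := (PySem.Str.split? s sep).getD []
-- get_chrom_bx(s) = s.split(':')[0]  (split(':') is never empty, so the [0] never raises)
def chromBx (t : String) : String := (pySplit t ":").headD ""
-- get_beg_bx(s) = int(s.split(':')[1]); none where Python raises IndexError/ValueError
def begBx? (t : String) : Option Int := (PySem.List.pyGet? (pySplit t ":") 1).bind PySem.Int.ofStr?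
-- get_len_bx(s) = int(s.split(':')[2])
def lenBx? (t : String) : Option Int := (PySem.List.pyGet? (pySplit t ":") 2).bind PySem.Int.ofStr?

-- the while-loop of partition(): first entry whose chromosome is c, plus the remaining entries;
-- none where Python's s[i] raises IndexError
def scanChrom (s : List String) (c : String) : Option (String × List String) :=
  match s with
  | [] => none
  | t :: rest => if chromBx t = c then some (t, rest) else scanChrom rest c

-- one iteration of partition()'s for-loop (P is kept in order; its last element is P[-1])
def stepClusters (c : String) (acc : Option (List (Int × Int × Int))) (t : String) :
    Option (List (Int × Int × Int)) :=
  acc.bind fun P =>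
    if chromBx t = c then
      (begBx? t).bind fun beg =>
      (lenBx? t).bind fun n =>
      match P.getLast? with
      | some last =>
          if beg - last.2.1 ≤ 100 then
            some (P.dropLast ++ [(last.1, beg + n, last.2.2 + 1)])
          else some (P ++ [(beg, beg + n, 1)])
      | none => none   -- unreachable: P starts nonempty and stays nonempty
    else some P

-- partition(D,bx,c): none exactly where Python raises (KeyError / IndexError / ValueError)
def partitionA (D : List (String × String)) (bx c : String) : Option (List (Int × Int × Int)) :=
  match D.find? (fun kv => kv.1 == bx) with
  | none => none                      -- KeyError: bx not in D
  | some kv =>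
    let s := pySplit kv.2 ","
    match scanChrom s c with
    | none => none                    -- IndexError: no entry on chromosome c
    | some (t0, rest) =>
      (begBx? t0).bind fun beg =>
      (lenBx? t0).bind fun n =>
      rest.foldl (stepClusters c) (some [(beg, beg + n, 1)])

-- clean_P(P, 2)
def cleanPA (P : List (Int × Int × Int)) : List (Int × Int) :=
  P.foldl (fun F t => if 2 ≤ t.2.2 then F ++ [(t.1, t.2.1)] else F) []

-- isIsolated(pos, P)
def isIsolatedA (pos : Int) (P : List (Int × Int)) : Bool :=
  !(P.any (fun ab => decide (ab.1 - 100 ≤ pos) && decide (pos ≤ ab.2 + 100)))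

def nb_isolated (L : List (String × Int)) (bci : String) (D : List (String × String)) (c : String) : Int :=
  L.foldl (fun cpt p =>
    match partitionA D p.1 c with
    | none => cpt                     -- Python raises here; excluded by Pre_
    | some P => if isIsolatedA p.2 (cleanPA P) then cpt + 1 else cpt) 0

-- ===== PORT B =====
-- int(f[i]) of a pre-split entry; none where Python raises IndexError/ValueError
def fieldInt? (f : List String) (i : Int) : Option Int :=
  (PySem.List.pyGet? f i).bind PySem.Int.ofStr?

-- one iteration of bx_reads' loop: append (int(f[1]), int(f[2])) when f[0] == c
def readStep (c : String) (acc : Option (List (Int × Int))) (e : String) : Option (List (Int × Int)) :=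
  acc.bind fun rs =>
    let f := pySplit e ":"
    if f.headD "" = c then
      (fieldInt? f 1).bind fun beg =>
      (fieldInt? f 2).map fun ln => rs ++ [(beg, ln)]
    else some rs

-- bx_reads(v, c); none exactly where Python raises ValueError
def readsOf (v c : String) : Option (List (Int × Int)) :=
  (pySplit v ",").foldl (readStep c) (some [])

-- one iteration of bx_clusters' loop: state = (emitted clusters, open cluster)
def bStep (st : List (Int × Int) × Option (Int × Int × Int)) (r : Int × Int) :
    List (Int × Int) × Option (Int × Int × Int) :=
  match st.2 with
  | some cur =>
      if r.1 - cur.2.1 ≤ 100 then (st.1, some (cur.1, r.1 + r.2, cur.2.2 + 1))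
      else ((if 2 ≤ cur.2.2 then st.1 ++ [(cur.1, cur.2.1)] else st.1),
            some (r.1, r.1 + r.2, 1))
  | none => (st.1, some (r.1, r.1 + r.2, 1))

-- the final flush of bx_clusters
def bFlush (st : List (Int × Int) × Option (Int × Int × Int)) : List (Int × Int) :=
  match st.2 with
  | some cur => if 2 ≤ cur.2.2 then st.1 ++ [(cur.1, cur.2.1)] else st.1
  | none => st.1

def bClusters (rs : List (Int × Int)) : List (Int × Int) :=
  bFlush (rs.foldl bStep ([], none))

-- is_isolated_in(pos, clusters)
def isoB (pos : Int) (cl : List (Int × Int)) : Bool :=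
  cl.all (fun ab => !(decide (ab.1 - 100 ≤ pos) && decide (pos ≤ ab.2 + 100)))

-- one iteration of nb_isolated's loop: state = (cache, cpt)
def bFold (D : List (String × String)) (c : String)
    (st : PySem.Dict String (List (Int × Int)) × Int) (p : String × Int) :
    PySem.Dict String (List (Int × Int)) × Int :=
  match st.1.get? p.1 with
  | some cl => (st.1, if isoB p.2 cl then st.2 + 1 else st.2)
  | none =>
    match (D.find? (fun kv => kv.1 == p.1)).bind (fun kv => readsOf kv.2 c) with
    | none => (st.1, st.2)            -- Python raises here (KeyError/ValueError); excluded by Pre_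
    | some rs =>
      let cl := bClusters rs
      (st.1.insert p.1 cl, if isoB p.2 cl then st.2 + 1 else st.2)

def nb_isolated_alt (L : List (String × Int)) (bci : String) (D : List (String × String)) (c : String) : Int :=
  (L.foldl (bFold D c) ((PySem.Dict.empty : PySem.Dict String (List (Int × Int))), (0 : Int))).2

-- ===== PRECONDITION & SPEC =====
-- Pre_ excludes exactly the inputs where Python A raises: a barcode of L missing from D (KeyError),
-- a barcode entry with no chromosome-c read (IndexError), or a chromosome-c read whose pos/length
-- field is missing or not int-parsable (IndexError/ValueError).
def Pre_nb_isolated (L : List (String × Int)) (bci : String) (D : List (String × String)) (c : String) : Prop :=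
  (L.all (fun p =>
    match D.find? (fun kv => kv.1 == p.1) with
    | none => false
    | some kv =>
      let s := (PySem.Str.split? kv.2 ",").getD []
      s.any (fun t => ((PySem.Str.split? t ":").getD []).headD "" == c) &&
      s.all (fun t =>
        !(((PySem.Str.split? t ":").getD []).headD "" == c) ||
        (((PySem.List.pyGet? ((PySem.Str.split? t ":").getD []) 1).bind PySem.Int.ofStr?).isSome &&
         ((PySem.List.pyGet? ((PySem.Str.split? t ":").getD []) 2).bind PySem.Int.ofStr?).isSome)))) = true
instance (L : List (String × Int)) (bci : String) (D : List (String × String)) (c : String) : Decidable (Pre_nb_isolated L bci D c) := by unfold Pre_nb_isolated; infer_instance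

def pvWitness_nb_isolated : (List (String × Int)) × String × (List (String × String)) × String :=
  ([("b1", 5), ("b2", 300)], "x", [("b1", "chr1:0:10,chr1:20:10"), ("b2", "chr2:0:5,chr1:50:10,chr1:70:10")], "chr1")

def Spec_nb_isolated (L : List (String × Int)) (bci : String) (D : List (String × String)) (c : String) (out : Int) : Prop := out = nb_isolated_alt L bci D c
instance (L : List (String × Int)) (bci : String) (D : List (String × String)) (c : String) (out : Int) : Decidable (Spec_nb_isolated L bci D c out) := by unfold Spec_nb_isolated; infer_instance

-- ===== CLAIM (what is proved, stated in full; the proofs are below) =====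
def Claim_equal_nb_isolated : Prop := ∀ (L : List (String × Int)) (bci : String) (D : List (String × String)) (c : String), Dom_nb_isolated L bci D c → Pre_nb_isolated L bci D c → Spec_nb_isolated L bci D c (nb_isolated L bci D c)

-- ===== LEMMAS AND PROOFS =====

-- pure parsing of a list of entries: the (pos, len) pairs of the chromosome-c entries
def prF (c : String) : List String → Option (List (Int × Int))
  | [] => some []
  | e :: rest =>
    if (pySplit e ":").headD "" = c then
      (fieldInt? (pySplit e ":") 1).bind fun beg =>
      (fieldInt? (pySplit e ":") 2).bind fun ln =>
      (prF c rest).map ((beg, ln) :: ·)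
    else prF c rest

-- the pure clustering step A performs on an already-parsed read
def clStep (P : List (Int × Int × Int)) (r : Int × Int) : List (Int × Int × Int) :=
  match P.getLast? with
  | some last =>
      if r.1 - last.2.1 ≤ 100 then P.dropLast ++ [(last.1, r.1 + r.2, last.2.2 + 1)]
      else P ++ [(r.1, r.1 + r.2, 1)]
  | none => [(r.1, r.1 + r.2, 1)]

-- clean_P as a filterMap
def cleanF (P : List (Int × Int × Int)) : List (Int × Int) :=
  (P.filter (fun t => decide (2 ≤ t.2.2))).map (fun t => (t.1, t.2.1))

lemma cleanPA_eq (P : List (Int × Int × Int)) : cleanPA P = cleanF P := by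
  unfold cleanPA cleanF
  rw [show (fun (F : List (Int × Int)) (t : Int × Int × Int) =>
        if 2 ≤ t.2.2 then F ++ [(t.1, t.2.1)] else F) =
      (fun F t => if (fun (t : Int × Int × Int) => decide (2 ≤ t.2.2)) t = true then
        F ++ [(fun (t : Int × Int × Int) => (t.1, t.2.1)) t] else F) from by
    funext F t; simp]
  rw [PySem.List.foldl_append_if]
  simp

lemma clStep_ne_nil (P : List (Int × Int × Int)) (r : Int × Int) : clStep P r ≠ [] := by
  unfold clStep
  cases h : P.getLast? <;> simp_all <;> split_ifs <;> simp

lemma foldl_clStep_ne_nil (rs : List (Int × Int)) (P : List (Int × Int × Int)) (hP : P ≠ []) :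
    rs.foldl clStep P ≠ [] := by
  induction rs generalizing P with
  | nil => exact hP
  | cons r rs ih => exact ih _ (clStep_ne_nil P r)

-- B's reads loop = pure parsing (modulo the accumulated prefix)
lemma foldl_readStep_none (c : String) (s : List String) :
    s.foldl (readStep c) none = none := by
  induction s with
  | nil => rfl
  | cons e s ih => simpa [readStep] using ih

lemma foldl_readStep_eq (c : String) (s : List String) (rs0 : List (Int × Int)) :
    s.foldl (readStep c) (some rs0) = (prF c s).map (rs0 ++ ·) := by
  induction s generalizing rs0 with
  | nil => simp [prF]
  | cons e s ih =>
    simp only [List.foldl_cons, prF]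
    by_cases hc : (pySplit e ":").headD "" = c
    · simp only [readStep, hc, if_pos, Option.bind_some]
      cases hb : fieldInt? (pySplit e ":") 1 with
      | none => simp [foldl_readStep_none]
      | some beg =>
        cases hl : fieldInt? (pySplit e ":") 2 with
        | none => simp [foldl_readStep_none]
        | some ln =>
          simp only [Option.bind_some, Option.map_some]
          rw [ih]
          cases prF c s <;> simp
    · simp only [readStep, hc, if_neg, Option.bind_some, ite_false]
      exact ih rs0

lemma readsOf_eq (v c : String) : readsOf v c = prF c (pySplit v ",") := by
  unfold readsOf
  rw [foldl_readStep_eq]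
  cases prF c (pySplit v ",") <;> simp

-- A's string-level cluster fold = pure parsing then pure clustering
lemma foldl_stepClusters_none (c : String) (s : List String) :
    s.foldl (stepClusters c) none = none := by
  induction s with
  | nil => rfl
  | cons e s ih => simpa [stepClusters] using ih

lemma stepClusters_some (c : String) (P : List (Int × Int × Int)) (hP : P ≠ []) (t : String)
    (beg n : Int) (hb : begBx? t = some beg) (hn : lenBx? t = some n) (hc : chromBx t = c) :
    stepClusters c (some P) t = some (clStep P (beg, n)) := by
  obtain ⟨last, hl⟩ := Option.isSome_iff_exists.mp
    ((List.getLast?_isSome (l := P)).mpr hP)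
  simp only [stepClusters, clStep, hc, hb, hn, hl, Option.bind_some, if_pos]
  split_ifs <;> rfl

lemma foldl_stepClusters_eq (c : String) (s : List String) (P : List (Int × Int × Int)) (hP : P ≠ []) :
    s.foldl (stepClusters c) (some P) = (prF c s).map (fun rs => rs.foldl clStep P) := by
  induction s generalizing P with
  | nil => rfl
  | cons e s ih =>
    simp only [List.foldl_cons, prF]
    by_cases hc : chromBx e = c
    · have hc' : (pySplit e ":").headD "" = c := hc
      simp only [hc', if_pos]
      cases hb : begBx? e with
      | none =>
        have : stepClusters c (some P) e = none := by
          obtain ⟨last, hl⟩ := Option.isSome_iff_exists.mp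
            ((List.getLast?_isSome (l := P)).mpr hP)
          simp [stepClusters, hc, hb, hl]
        rw [this, foldl_stepClusters_none]
        simp [show fieldInt? (pySplit e ":") 1 = none from hb]
      | some beg =>
        cases hl : lenBx? e with
        | none =>
          have : stepClusters c (some P) e = none := by
            obtain ⟨last, hla⟩ := Option.isSome_iff_exists.mp
              ((List.getLast?_isSome (l := P)).mpr hP)
            simp [stepClusters, hc, hb, hl, hla]
          rw [this, foldl_stepClusters_none]
          simp [show fieldInt? (pySplit e ":") 1 = some beg from hb,
                show fieldInt? (pySplit e ":") 2 = none from hl]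
        | some n =>
          rw [stepClusters_some c P hP e beg n hb hl hc,
              ih (clStep P (beg, n)) (clStep_ne_nil P (beg, n))]
          simp only [show fieldInt? (pySplit e ":") 1 = some beg from hb,
                show fieldInt? (pySplit e ":") 2 = some n from hl, Option.bind_some]
          cases prF c s <;> simp
    · have hc' : ¬ (pySplit e ":").headD "" = c := hc
      simp only [hc', if_neg, ite_false, stepClusters, Option.bind_some, hc]
      exact ih P hP

-- partition() through the parsed-reads lens
lemma partitionA_eq (D : List (String × String)) (bx c : String) :
    partitionA D bx c =
      (D.find? (fun kv => kv.1 == bx)).bind fun kv =>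
        (prF c (pySplit kv.2 ",")).bind fun rs =>
          match rs with
          | [] => none
          | r :: rest => some (rest.foldl clStep [(r.1, r.1 + r.2, 1)]) := by
  unfold partitionA
  cases D.find? (fun kv => kv.1 == bx) with
  | none => rfl
  | some kv =>
    simp only [Option.bind_some]
    generalize pySplit kv.2 "," = s
    induction s with
    | nil => rfl
    | cons e s ih =>
      simp only [scanChrom, prF]
      by_cases hc : chromBx e = c
      · have hc' : (pySplit e ":").headD "" = c := hc
        simp only [hc, hc', if_pos]
        cases hb : begBx? e with
        | none => simp [show fieldInt? (pySplit e ":") 1 = none from hb]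
        | some beg =>
          cases hl : lenBx? e with
          | none => simp [show fieldInt? (pySplit e ":") 1 = some beg from hb,
                          show fieldInt? (pySplit e ":") 2 = none from hl]
          | some n =>
            simp only [Option.bind_some,
              show fieldInt? (pySplit e ":") 1 = some beg from hb,
              show fieldInt? (pySplit e ":") 2 = some n from hl]
            rw [foldl_stepClusters_eq c s [(beg, beg + n, 1)] (by simp)]
            cases prF c s <;> simp
      · have hc' : ¬ (pySplit e ":").headD "" = c := hc
        simp only [hc, hc', if_neg, ite_false]
        exact ih

-- cleanF distributes over the closing of a cluster
lemma cleanF_append (P Q : List (Int × Int × Int)) : cleanF (P ++ Q) = cleanF P ++ cleanF Q := by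
  simp [cleanF]

-- invariant of B's streaming pass: its state is A's partition split into
-- (cleaned closed clusters, open cluster)
lemma foldl_bStep_eq (rs : List (Int × Int)) (P : List (Int × Int × Int)) (hP : P ≠ []) :
    rs.foldl bStep (cleanF P.dropLast, P.getLast?) =
      (cleanF (rs.foldl clStep P).dropLast, (rs.foldl clStep P).getLast?) := by
  induction rs generalizing P with
  | nil => rfl
  | cons r rs ih =>
    obtain ⟨last, hl⟩ := Option.isSome_iff_exists.mp
      ((List.getLast?_isSome (l := P)).mpr hP)
    have key : bStep (cleanF P.dropLast, P.getLast?) r =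
        (cleanF (clStep P r).dropLast, (clStep P r).getLast?) := by
      simp only [bStep, clStep, hl]
      by_cases hgap : r.1 - last.2.1 ≤ 100
      · simp [hgap]
      · have hPd : P = P.dropLast ++ [last] :=
          (List.dropLast_append_getLast? last hl).symm
        have hclean : cleanF P = cleanF P.dropLast ++ cleanF [last] := by
          conv_lhs => rw [hPd]
          rw [cleanF_append]
        simp only [hgap, if_neg, ite_false, Prod.mk.injEq]
        constructor
        · rw [List.dropLast_concat, hclean]
          by_cases h2 : 2 ≤ last.2.2 <;> simp [cleanF, h2]
        · simp
    rw [List.foldl_cons, List.foldl_cons, key]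
    exact ih (clStep P r) (clStep_ne_nil P r)

-- the per-barcode result of B = clean_P of A's partition
lemma bClusters_eq (r : Int × Int) (rest : List (Int × Int)) :
    bClusters (r :: rest) = cleanF (rest.foldl clStep [(r.1, r.1 + r.2, 1)]) := by
  unfold bClusters
  rw [List.foldl_cons, show bStep ([], none) r = ([], some (r.1, r.1 + r.2, 1)) from rfl]
  rw [show (([] : List (Int × Int)), some (r.1, r.1 + r.2, 1)) =
      (cleanF ([(r.1, r.1 + r.2, 1)] : List (Int × Int × Int)).dropLast,
       ([(r.1, r.1 + r.2, 1)] : List (Int × Int × Int)).getLast?) from by simp [cleanF]]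
  rw [foldl_bStep_eq rest [(r.1, r.1 + r.2, 1)] (by simp)]
  set Q := rest.foldl clStep [(r.1, r.1 + r.2, 1)] with hQ
  have hQne : Q ≠ [] := foldl_clStep_ne_nil rest _ (by simp)
  obtain ⟨last, hl⟩ := Option.isSome_iff_exists.mp
    ((List.getLast?_isSome (l := Q)).mpr hQne)
  have hQd : Q = Q.dropLast ++ [last] := (List.dropLast_append_getLast? last hl).symm
  simp only [bFlush, hl]
  rw [show cleanF Q = cleanF Q.dropLast ++ cleanF [last] by
    conv_lhs => rw [hQd]
    rw [cleanF_append]]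
  by_cases h2 : 2 ≤ last.2.2 <;> simp [cleanF, h2]

lemma isoB_eq (pos : Int) (cl : List (Int × Int)) : isoB pos cl = isIsolatedA pos cl := by
  simp [isoB, isIsolatedA, List.all_eq_not_any_not]

-- what Pre_ grants per element of L
def PreElem (D : List (String × String)) (c : String) (p : String × Int) : Prop :=
  ∃ kv, D.find? (fun kv => kv.1 == p.1) = some kv ∧
    ∃ r rest, readsOf kv.2 c = some (r :: rest)

-- prF succeeds when every chromosome-c entry parses, and is nonempty when one exists
lemma prF_total (c : String) (s : List String)
    (h : ∀ e ∈ s, (pySplit e ":").headD "" = c →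
      (fieldInt? (pySplit e ":") 1).isSome = true ∧ (fieldInt? (pySplit e ":") 2).isSome = true) :
    ∃ rs, prF c s = some rs ∧ ((∃ e ∈ s, (pySplit e ":").headD "" = c) → rs ≠ []) := by
  induction s with
  | nil => exact ⟨[], rfl, by rintro ⟨e, he, -⟩; simp at he⟩
  | cons e s ih =>
    obtain ⟨rs, hrs, hx⟩ := ih (fun e' he' => h e' (by simp [he']))
    by_cases hec : (pySplit e ":").headD "" = c
    · obtain ⟨h1, h2⟩ := h e (by simp) hec
      obtain ⟨beg, hb1⟩ := Option.isSome_iff_exists.mp h1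
      obtain ⟨ln, hb2⟩ := Option.isSome_iff_exists.mp h2
      refine ⟨(beg, ln) :: rs, ?_, fun _ => by simp⟩
      simp only [prF]
      rw [if_pos hec, hb1, hb2, hrs]
      rfl
    · refine ⟨rs, ?_, ?_⟩
      · simp only [prF]
        rw [if_neg hec]
        exact hrs
      · rintro ⟨e', he', he'c⟩
        rcases List.mem_cons.mp he' with rfl | he's
        · exact absurd he'c hec
        · exact hx ⟨e', he's, he'c⟩

lemma pre_elem (L : List (String × Int)) (bci : String) (D : List (String × String)) (c : String)
    (h : Pre_nb_isolated L bci D c) : ∀ p ∈ L, PreElem D c p := by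
  intro p hp
  unfold Pre_nb_isolated at h
  rw [List.all_eq_true] at h
  have hb := h p hp
  unfold PreElem
  cases hfind : D.find? (fun kv => kv.1 == p.1) with
  | none => rw [hfind] at hb; simp at hb
  | some kv =>
    refine ⟨kv, rfl, ?_⟩
    rw [hfind] at hb
    simp only [Bool.and_eq_true, List.any_eq_true, List.all_eq_true] at hb
    obtain ⟨⟨t, ht, htc⟩, hall⟩ := hb
    rw [readsOf_eq]
    have hall2 : ∀ e ∈ pySplit kv.2 ",", (pySplit e ":").headD "" = c →
        (fieldInt? (pySplit e ":") 1).isSome = true ∧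
        (fieldInt? (pySplit e ":") 2).isSome = true := by
      intro e he hec
      have h0 := hall e he
      rw [Bool.or_eq_true, Bool.and_eq_true] at h0
      rcases h0 with h1 | h2
      · exfalso
        rw [Bool.not_eq_true', beq_eq_false_iff_ne] at h1
        exact h1 hec
      · exact ⟨h2.1, h2.2⟩
    obtain ⟨rs, hrs, hne⟩ := prF_total c (pySplit kv.2 ",") hall2
    cases rs with
    | nil => exact absurd rfl (hne ⟨t, ht, eq_of_beq htc⟩)
    | cons r rest => exact ⟨r, rest, hrs⟩

-- the main fold lemma: B's cached fold counts exactly like A's fold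
lemma fold_cache_eq (D : List (String × String)) (c : String) (L : List (String × Int))
    (cache : PySem.Dict String (List (Int × Int))) (cpt : Int)
    (hc : ∀ k cl, cache.get? k = some cl →
      ∃ rs, ((D.find? (fun kv => kv.1 == k)).bind (fun kv => readsOf kv.2 c)) = some rs ∧
            bClusters rs = cl)
    (hL : ∀ p ∈ L, PreElem D c p) :
    (L.foldl (bFold D c) (cache, cpt)).2 =
    L.foldl (fun cpt p =>
      match partitionA D p.1 c with
      | none => cpt
      | some P => if isIsolatedA p.2 (cleanPA P) then cpt + 1 else cpt) cpt := by
  induction L generalizing cache cpt with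
  | nil => rfl
  | cons p L ih =>
    obtain ⟨kv, hfind, r, rest, hreads⟩ := hL p (by simp)
    have hbind : ((D.find? (fun kv => kv.1 == p.1)).bind (fun kv => readsOf kv.2 c)) =
        some (r :: rest) := by rw [hfind]; simpa using hreads
    have hpart : partitionA D p.1 c = some (rest.foldl clStep [(r.1, r.1 + r.2, 1)]) := by
      rw [partitionA_eq, hfind]
      simp only [Option.bind_some]
      rw [← readsOf_eq, hreads]
      rfl
    have hcl : cleanPA (rest.foldl clStep [(r.1, r.1 + r.2, 1)]) = bClusters (r :: rest) := by
      rw [cleanPA_eq, bClusters_eq]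
    simp only [List.foldl_cons, hpart]
    rw [hcl, ← isoB_eq p.2 (bClusters (r :: rest))]
    cases hget : cache.get? p.1 with
    | some cl =>
      obtain ⟨rs', hrs', hbcl⟩ := hc p.1 cl hget
      rw [hbind] at hrs'
      have hrs : rs' = r :: rest := (Option.some_injective _ hrs').symm
      subst hrs
      have hB : bFold D c (cache, cpt) p =
          (cache, if isoB p.2 (bClusters (r :: rest)) then cpt + 1 else cpt) := by
        unfold bFold
        rw [hget, hbcl]
      rw [hB]
      exact ih cache _ hc (fun q hq => hL q (by simp [hq]))
    | none =>
      have hB : bFold D c (cache, cpt) p =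
          (cache.insert p.1 (bClusters (r :: rest)),
           if isoB p.2 (bClusters (r :: rest)) then cpt + 1 else cpt) := by
        unfold bFold
        rw [hget, hbind]
      rw [hB]
      refine ih _ _ ?_ (fun q hq => hL q (by simp [hq]))
      intro k cl' hk
      by_cases hkp : k = p.1
      · subst hkp
        rw [PySem.Dict.get?_insert_self] at hk
        exact ⟨r :: rest, hbind, Option.some_injective _ hk⟩
      · rw [PySem.Dict.get?_insert_of_ne _ _ hkp] at hk
        exact hc k cl' hk

-- ===== VERDICT (by name: the statement is the Claim_ definition above) =====
theorem nb_isolated_spec : Claim_equal_nb_isolated := by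
  intro L bci D c _ hpre
  unfold Spec_nb_isolated nb_isolated nb_isolated_alt
  rw [fold_cache_eq D c L PySem.Dict.empty 0
    (fun k cl h => by simp [PySem.Dict.get?_empty] at h)
    (pre_elem L bci D c hpre)]
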